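-- pv_equiv track=rewrite | github.com/RestRegular/RSE | rse.py | replaceByHand
-- ===== SOURCE A (Python) =====
-- def replaceByHand(origin, fsign, sign, re_sign):
--     new_content = ''
--     i = 0
--     while i < len(origin):
--         c = origin[i]
--         if c != fsign:
--             new_content += c
--         else:
--             while c != sign:
--                 new_content += c
--                 i += 1
--                 c = origin[i]
--             new_content += re_sign
--         i += 1
--     return new_content
-- ===== SOURCE B (Python) =====
-- def replaceByHand(origin, fsign, sign, re_sign):
--     if len(fsign) != 1:
--         return origin
--     parts = []
--     i = 0
--     while True:
--         j = origin.find(fsign, i)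
--         if j == -1:
--             parts.append(origin[i:])
--             break
--         parts.append(origin[i:j])
--         k = j
--         while origin[k] != sign:
--             k += 1
--         parts.append(origin[j:k])
--         parts.append(re_sign)
--         i = k + 1
--     return ''.join(parts)
-- ===== Notes on version B (the rewrite author's own statement) =====
-- stated objective: faster
-- what changed: B locates each marked region with find and copies the maximal non-region runs as bulk slices joined at the end, and short-circuits non-single-char fsign, instead of A's char-by-char copy via repeated string concatenation.
import Mathlib
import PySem

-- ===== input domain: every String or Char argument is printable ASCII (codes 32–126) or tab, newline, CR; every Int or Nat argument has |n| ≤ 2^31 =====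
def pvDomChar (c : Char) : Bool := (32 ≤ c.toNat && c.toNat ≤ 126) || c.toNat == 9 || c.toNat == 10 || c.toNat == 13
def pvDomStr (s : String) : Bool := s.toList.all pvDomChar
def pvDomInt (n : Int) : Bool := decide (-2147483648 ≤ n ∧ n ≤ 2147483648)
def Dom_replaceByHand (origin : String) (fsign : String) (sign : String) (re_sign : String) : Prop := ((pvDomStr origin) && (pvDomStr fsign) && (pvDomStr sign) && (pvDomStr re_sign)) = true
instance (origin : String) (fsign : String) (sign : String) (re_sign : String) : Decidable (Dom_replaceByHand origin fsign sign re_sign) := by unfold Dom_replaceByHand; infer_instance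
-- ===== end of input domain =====

-- B copies non-region runs in bulk (find + slice, joined once) instead of A's char-by-char copy with repeated concatenation (measured faster); equal return values on Pre_ (inputs where A raises no IndexError).

-- ===== PORT A =====
-- inner 'while c != sign' loop of A: appends chars until the sign char, then re_sign.
-- Returns (new accumulator, remaining suffix after the sign char).
-- On [] Python raises IndexError (origin[i] out of range); excluded by Pre_.
def pvInnerA (sign re : List Char) : List Char → List Char → List Char × List Char
  | [], acc => (acc, [])
  | c :: rest, acc => if [c] = sign then (acc ++ re, rest) else pvInnerA sign re rest (acc ++ [c])

lemma pvInnerA_len (sign re : List Char) : ∀ (l acc : List Char), (pvInnerA sign re l acc).2.length ≤ l.length - 1 := by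
  intro l
  induction l with
  | nil => intro acc; simp [pvInnerA]
  | cons c rest ih =>
      intro acc
      simp only [pvInnerA]
      split
      · simp
      · have := ih (acc ++ [c]); simp at this ⊢; omega

-- outer while loop of A
def pvOuterA (fsign sign re : List Char) : List Char → List Char → List Char
  | [], acc => acc
  | c :: rest, acc =>
    if [c] ≠ fsign then pvOuterA fsign sign re rest (acc ++ [c])
    else
      let p := pvInnerA sign re (c :: rest) acc
      pvOuterA fsign sign re p.2 p.1
termination_by l _ => l.length
decreasing_by
  · simp
  · have := pvInnerA_len sign re (c :: rest) acc
    simp at this ⊢; omega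

def replaceByHand (origin : String) (fsign : String) (sign : String) (re_sign : String) : String :=
  String.ofList (pvOuterA fsign.toList sign.toList re_sign.toList origin.toList [])

-- ===== PORT B =====
-- inner char-scan of B: 'k = j; while origin[k] != sign: k += 1'; returns (origin[j:k], suffix after the sign char).
-- On [] Python raises IndexError; excluded by Pre_.
def pvScanB (sign : List Char) : List Char → List Char → List Char × List Char
  | [], seen => (seen, [])
  | c :: rest, seen => if [c] = sign then (seen, rest) else pvScanB sign rest (seen ++ [c])

lemma pvScanB_len (sign : List Char) : ∀ (l seen : List Char), (pvScanB sign l seen).2.length ≤ l.length - 1 := by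
  intro l
  induction l with
  | nil => intro seen; simp [pvScanB]
  | cons c rest ih =>
      intro seen
      simp only [pvScanB]
      split
      · simp
      · have := ih (seen ++ [c]); simp at this ⊢; omega

-- outer loop of B: j = origin.find(fsign, i) splits the suffix into the non-region run
-- (takeWhile) and the rest (dropWhile); the run is appended in one piece.
def pvOuterB (f : Char) (sign re : List Char) (l acc : List Char) : List Char :=
  if hstop : l.dropWhile (fun c => c ≠ f) = [] then acc ++ l.takeWhile (fun c => c ≠ f)
  else
    let p := pvScanB sign (l.dropWhile (fun c => c ≠ f)) []
    pvOuterB f sign re p.2 (acc ++ l.takeWhile (fun c => c ≠ f) ++ p.1 ++ re)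
termination_by l.length
decreasing_by
  have h1 := pvScanB_len sign (l.dropWhile (fun c => c ≠ f)) []
  have h2 : (l.dropWhile (fun c => c ≠ f)).length ≤ l.length := List.length_dropWhile_le _ _
  have h3 : (l.dropWhile (fun c => c ≠ f)).length ≠ 0 := by
    intro hc; exact hstop (List.length_eq_zero_iff.mp hc)
  omega

def replaceByHand_alt (origin : String) (fsign : String) (sign : String) (re_sign : String) : String :=
  match fsign.toList with
  | [f] => String.ofList (pvOuterB f sign.toList re_sign.toList origin.toList [])
  | _ => origin

-- ===== PRECONDITION & SPEC =====
-- Pre_ excludes exactly the inputs where A raises IndexError: some occurrence of the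
-- (single-char) fsign in origin with no occurrence of the (single-char) sign at or after it.
def Pre_replaceByHand (origin : String) (fsign : String) (sign : String) (re_sign : String) : Prop :=
  ∀ t ∈ origin.toList.tails, t ≠ [] → [t.headI] = fsign.toList → t.any (fun d => [d] = sign.toList) = true
instance (origin : String) (fsign : String) (sign : String) (re_sign : String) : Decidable (Pre_replaceByHand origin fsign sign re_sign) := by unfold Pre_replaceByHand; infer_instance

def pvWitness_replaceByHand : String × String × String × String := ("x a+b y", "+", "b", "-")

def Spec_replaceByHand (origin : String) (fsign : String) (sign : String) (re_sign : String) (out : String) : Prop := out = replaceByHand_alt origin fsign sign re_sign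
instance (origin : String) (fsign : String) (sign : String) (re_sign : String) (out : String) : Decidable (Spec_replaceByHand origin fsign sign re_sign out) := by unfold Spec_replaceByHand; infer_instance

-- ===== CLAIM (what is proved, stated in full; the proofs are below) =====
def Claim_equal_replaceByHand : Prop := ∀ (origin : String) (fsign : String) (sign : String) (re_sign : String), Dom_replaceByHand origin fsign sign re_sign → Pre_replaceByHand origin fsign sign re_sign → Spec_replaceByHand origin fsign sign re_sign (replaceByHand origin fsign sign re_sign)

-- ===== LEMMAS AND PROOFS =====

-- A copies a run of non-fsign chars one at a time
lemma pvOuterA_copy (fsign sign re : List Char) :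
    ∀ (pre post acc : List Char), (∀ c ∈ pre, [c] ≠ fsign) →
      pvOuterA fsign sign re (pre ++ post) acc = pvOuterA fsign sign re post (acc ++ pre) := by
  intro pre
  induction pre with
  | nil => intro post acc _; simp
  | cons c pre ih =>
      intro post acc h
      have hc : [c] ≠ fsign := h c (by simp)
      rw [List.cons_append, pvOuterA]
      simp only [hc, if_pos, ne_eq, not_false_iff]
      rw [ih post (acc ++ [c]) (fun d hd => h d (by simp [hd]))]
      simp

-- accumulator lemma for B's scan
lemma pvScanB_acc (sign : List Char) :
    ∀ (l seen : List Char),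
      pvScanB sign l seen = (seen ++ (pvScanB sign l []).1, (pvScanB sign l []).2) := by
  intro l
  induction l with
  | nil => intro seen; simp [pvScanB]
  | cons c rest ih =>
      intro seen
      simp only [pvScanB]
      split
      · simp
      · rw [ih (seen ++ [c]), ih ([] ++ [c])]; simp

-- A's inner loop computed from B's scan, when the sign char occurs
lemma pvInnerA_eq_scan (sign re : List Char) :
    ∀ (l acc : List Char), (∃ d ∈ l, [d] = sign) →
      pvInnerA sign re l acc = (acc ++ (pvScanB sign l []).1 ++ re, (pvScanB sign l []).2) := by
  intro l
  induction l with
  | nil => intro acc h; simp at h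
  | cons c rest ih =>
      intro acc h
      by_cases hc : [c] = sign
      · simp [pvInnerA, pvScanB, hc]
      · have hrest : ∃ d ∈ rest, [d] = sign := by
          obtain ⟨d, hd, hds⟩ := h
          rcases List.mem_cons.mp hd with rfl | hd'
          · exact absurd hds hc
          · exact ⟨d, hd', hds⟩
        simp only [pvInnerA, pvScanB, hc, if_false]
        rw [ih (acc ++ [c]) hrest, pvScanB_acc sign rest ([] ++ [c])]
        simp

-- B's scan remainder is a suffix of its input
lemma pvScanB_suffix (sign : List Char) :
    ∀ (l seen : List Char), (pvScanB sign l seen).2 <:+ l := by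
  intro l
  induction l with
  | nil => intro seen; simp [pvScanB]
  | cons c rest ih =>
      intro seen
      simp only [pvScanB]
      split
      · exact List.suffix_cons c rest
      · exact (ih (seen ++ [c])).trans (List.suffix_cons c rest)

-- the Pre_ condition restricted to a list, and its suffix-closure
def pvPreL (fsign sign : List Char) (l : List Char) : Prop :=
  ∀ t ∈ l.tails, t ≠ [] → [t.headI] = fsign → t.any (fun d => [d] = sign) = true

lemma pvPreL_suffix {fsign sign : List Char} {l t : List Char}
    (h : pvPreL fsign sign l) (ht : t <:+ l) : pvPreL fsign sign t := by
  intro u hu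
  exact h u ((List.mem_tails _ _).mpr (((List.mem_tails _ _).mp hu).trans ht))

-- main lemma, single-char fsign case
lemma pvOuter_eq (f : Char) (sign re : List Char) :
    ∀ (n : ℕ) (l acc : List Char), l.length ≤ n → pvPreL [f] sign l →
      pvOuterA [f] sign re l acc = pvOuterB f sign re l acc := by
  intro n
  induction n with
  | zero =>
      intro l acc hl _
      have : l = [] := List.length_eq_zero_iff.mp (Nat.le_zero.mp hl)
      subst this
      rw [pvOuterB]; simp [pvOuterA]
  | succ n ih =>
      intro l acc hl hpre
      have hsplit : l.takeWhile (fun c => c ≠ f) ++ l.dropWhile (fun c => c ≠ f) = l :=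
        List.takeWhile_append_dropWhile
      have hcopy : ∀ c ∈ l.takeWhile (fun c => c ≠ f), [c] ≠ [f] := by
        intro c hc hlc
        have := List.mem_takeWhile_imp hc
        simp at this hlc
        exact this hlc
      have hA : pvOuterA [f] sign re l acc
          = pvOuterA [f] sign re (l.dropWhile (fun c => c ≠ f)) (acc ++ l.takeWhile (fun c => c ≠ f)) := by
        conv_lhs => rw [← hsplit]
        exact pvOuterA_copy [f] sign re _ _ acc hcopy
      rcases hd : l.dropWhile (fun c => c ≠ f) with _ | ⟨c, rest⟩
      · rw [pvOuterB, dif_pos hd, hA, hd, pvOuterA]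
      · -- head of dropWhile fails the predicate, so c = f
        have hcf : c = f := by
          have := List.head?_dropWhile_not (fun c => decide (c ≠ f)) l
          rw [hd] at this; simp at this; exact this
        have hcf2 : f = c := hcf.symm
        subst hcf2
        have hsufl : l.dropWhile (fun c => c ≠ f) <:+ l := List.dropWhile_suffix _
        have hsign : ∃ d ∈ f :: rest, [d] = sign := by
          have := hpre (f :: rest) ((List.mem_tails _ _).mpr (hd ▸ hsufl)) (by simp) (by simp)
          simpa using this
        rw [hA, hd, pvOuterA]
        simp only [ne_eq, not_true_eq_false, ite_false]
        rw [pvInnerA_eq_scan sign re (f :: rest) _ hsign]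
        rw [pvOuterB, dif_neg (hd ▸ (by simp : (f :: rest : List Char) ≠ []))]
        simp only [hd]
        have hlen : (pvScanB sign (f :: rest) []).2.length ≤ n := by
          have h1 := pvScanB_len sign (f :: rest) []
          have h2 : (f :: rest).length ≤ l.length := by
            rw [← hd]; exact List.length_dropWhile_le _ _
          simp at h1 h2 ⊢; omega
        have hsuf2 : (pvScanB sign (f :: rest) []).2 <:+ l :=
          (pvScanB_suffix sign (f :: rest) []).trans (hd ▸ hsufl)
        rw [ih _ _ hlen (pvPreL_suffix hpre hsuf2)]

-- when fsign is not a single char, A copies everything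
lemma pvOuterA_all (fsign sign re : List Char) (hfs : ∀ c : Char, [c] ≠ fsign)
    (l acc : List Char) : pvOuterA fsign sign re l acc = acc ++ l := by
  have := pvOuterA_copy fsign sign re l [] acc (fun c _ => hfs c)
  simpa [pvOuterA] using this

-- ===== VERDICT (by name: the statement is the Claim_ definition above) =====
theorem replaceByHand_spec : Claim_equal_replaceByHand := by
  intro origin fsign sign re_sign _ hpre
  unfold Spec_replaceByHand replaceByHand replaceByHand_alt
  rcases hf : fsign.toList with _ | ⟨f, _ | ⟨c2, fr⟩⟩
  · rw [pvOuterA_all _ _ _ (by simp) origin.toList []]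
    simp
  · rw [pvOuter_eq f sign.toList re_sign.toList origin.toList.length origin.toList [] le_rfl]
    intro t ht hne hhd
    exact hpre t ht hne (by rw [hf]; exact hhd)
  · rw [pvOuterA_all _ _ _ (by simp) origin.toList []]
    simp
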